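-- pv_equiv track=rewrite | github.com/matuspintek-boop/ib111 | 11/p2_rewrite.py | is_creatable
-- ===== SOURCE A (Python) =====
-- def conversion_possible(wanted: str, rules: dict[str, list[str]],
--                         already_had: set[str]) -> bool:
--
--     initial: int = 0
--     while len(already_had) > initial and wanted not in already_had:
--         initial = len(already_had)
--         to_add = set()
--         for char in already_had:
--             for new_char in rules.get(char, []):
--                 to_add.add(new_char)
--         already_had.update(to_add)
--     return wanted in already_had
--
-- def is_creatable(wanted: str, initial: str,
--                  rules: dict[str, list[str]]) -> bool:
--     if len(wanted) != len(initial):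
--         return False
--     for index in range(len(initial)):
--         if not conversion_possible(wanted[index], rules, set(initial[index])):
--             return False
--     return True
-- ===== SOURCE B (Python) =====
-- def _reachable(start: str, target: str, rules: dict[str, list[str]]) -> bool:
--     stack = [start]
--     visited = {start}
--     while stack:
--         node = stack.pop()
--         if node == target:
--             return True
--         for nxt in rules.get(node, []):
--             if nxt not in visited:
--                 visited.add(nxt)
--                 stack.append(nxt)
--     return False
--
-- def is_creatable(wanted: str, initial: str,
--                  rules: dict[str, list[str]]) -> bool:
--     if len(wanted) != len(initial):
--         return False
--     for w, c in zip(wanted, initial):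
--         if not _reachable(c, w, rules):
--             return False
--     return True
-- ===== Notes on version B (the rewrite author's own statement) =====
-- stated objective: alternative
-- what changed: A saturates, for every position, the whole set of derivable symbols by repeated full-set expansion rounds until a fixpoint; B instead runs a DFS graph-reachability search from the start character with a visited set and early exit on the target.
import Mathlib
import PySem

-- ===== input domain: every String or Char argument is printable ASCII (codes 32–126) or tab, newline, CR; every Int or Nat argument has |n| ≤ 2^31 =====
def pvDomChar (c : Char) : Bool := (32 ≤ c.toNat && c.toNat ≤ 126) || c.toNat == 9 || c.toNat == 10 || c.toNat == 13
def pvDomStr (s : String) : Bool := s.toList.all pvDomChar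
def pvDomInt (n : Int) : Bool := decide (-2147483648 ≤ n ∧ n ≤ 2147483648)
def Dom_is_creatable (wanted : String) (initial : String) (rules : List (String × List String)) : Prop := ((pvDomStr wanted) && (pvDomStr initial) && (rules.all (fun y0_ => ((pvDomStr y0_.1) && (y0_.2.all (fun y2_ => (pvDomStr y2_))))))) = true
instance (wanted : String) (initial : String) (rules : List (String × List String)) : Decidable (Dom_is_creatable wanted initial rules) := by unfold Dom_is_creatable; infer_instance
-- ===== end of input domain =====

-- B replaces A's per-position whole-set fixpoint expansion by a per-position DFS
-- reachability search with a visited set and early exit on the target character.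

-- ===== PORT A =====
-- rules.get(x, []) on the dict built from the association list (used by both ports)
def pvSuccs (rules : List (String × List String)) (x : String) : List String :=
  (PySem.Dict.ofList rules).getD x []

-- all right-hand-side symbols of the rules; its length only sizes the fuel of the
-- loop ports below (the lemmas prove this fuel strictly exceeds the number of
-- iterations either Python loop can perform, so the ports are exact)
def pvFlat (rules : List (String × List String)) : List String :=
  rules.flatMap (fun p => p.2)

-- s[i] as the 1-character Python string; A only indexes in range (lengths were checked equal)
def pvIdxStr (s : String) (i : Int) : String :=
  match PySem.Str.pyGet? s i with
  | some c => String.ofList [c]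
  | none => ""

-- the while-loop of conversion_possible: expand the whole set by one round of rules
def pvConvLoop (wanted : String) (rules : List (String × List String)) :
    Nat → Nat → PySem.Set String → Bool
  | 0, _, had => PySem.Set.contains had wanted
  | fuel+1, initN, had =>
    if had.length > initN && !(PySem.Set.contains had wanted) then
      let toAdd : PySem.Set String :=
        had.foldl (fun acc c => PySem.Set.update acc (pvSuccs rules c)) PySem.Set.empty
      pvConvLoop wanted rules fuel had.length (PySem.Set.update had toAdd)
    else PySem.Set.contains had wanted

def pvConversionPossible (wanted : String) (rules : List (String × List String))
    (had : PySem.Set String) : Bool :=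
  pvConvLoop wanted rules (had.length + (pvFlat rules).length + 1) 0 had

def is_creatable (wanted : String) (initial : String) (rules : List (String × List String)) : Bool :=
  if PySem.Str.len wanted != PySem.Str.len initial then false
  else (PySem.List.pyRange 0 (PySem.Str.len initial) 1).all fun index =>
    pvConversionPossible (pvIdxStr wanted index) rules
      (PySem.Set.ofList [pvIdxStr initial index])

-- ===== PORT B =====
-- the while-loop of _reachable: pop a node from the stack, early exit on target,
-- push the unvisited successors
def pvDfs (target : String) (rules : List (String × List String)) :
    Nat → List String → PySem.Set String → Bool
  | 0, _, _ => false
  | fuel+1, stack, visited =>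
    match PySem.List.pop? stack (-1) with
    | none => false
    | some (node, rest) =>
      if node == target then true
      else
        let sv := (pvSuccs rules node).foldl
          (fun (sv : List String × PySem.Set String) nxt =>
            if PySem.Set.contains sv.2 nxt then sv
            else (sv.1 ++ [nxt], PySem.Set.add sv.2 nxt)) (rest, visited)
        pvDfs target rules fuel sv.1 sv.2

def pvReachable (start : String) (target : String)
    (rules : List (String × List String)) : Bool :=
  pvDfs target rules ((pvFlat rules).length + 2) [start] (PySem.Set.ofList [start])

def is_creatable_alt (wanted : String) (initial : String) (rules : List (String × List String)) : Bool :=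
  if PySem.Str.len wanted != PySem.Str.len initial then false
  else (wanted.toList.zip initial.toList).all fun wc =>
    pvReachable (String.ofList [wc.2]) (String.ofList [wc.1]) rules

-- ===== PRECONDITION & SPEC =====
def Spec_is_creatable (wanted : String) (initial : String) (rules : List (String × List String)) (out : Bool) : Prop := out = is_creatable_alt wanted initial rules
instance (wanted : String) (initial : String) (rules : List (String × List String)) (out : Bool) : Decidable (Spec_is_creatable wanted initial rules out) := by unfold Spec_is_creatable; infer_instance

-- ===== CLAIM (what is proved, stated in full; the proofs are below) =====
def Claim_equal_is_creatable : Prop := ∀ (wanted : String) (initial : String) (rules : List (String × List String)), Dom_is_creatable wanted initial rules → Spec_is_creatable wanted initial rules (is_creatable wanted initial rules)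

-- ===== LEMMAS AND PROOFS =====

-- one rewrite step of the grammar, and reachability: the common specification both
-- per-character searches are proved equal to
def pvStep (rules : List (String × List String)) (a b : String) : Prop :=
  b ∈ pvSuccs rules a

def pvReach (rules : List (String × List String)) : String → String → Prop :=
  Relation.ReflTransGen (pvStep rules)

-- a set closed under the rules contains everything reachable from it
lemma pvReach_closed (rules : List (String × List String)) (S : List String)
    (hcl : ∀ x ∈ S, ∀ y ∈ pvSuccs rules x, y ∈ S) {a b : String}
    (ha : a ∈ S) (h : pvReach rules a b) : b ∈ S := by
  induction h with
  | refl => exact ha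
  | tail _ hbc ih => exact hcl _ ih _ hbc

lemma pvItems_update (C : String × List String → Prop) :
    ∀ (ps : List (String × List String)) (d : PySem.Dict String (List String)),
    (∀ p ∈ d.items, C p) → (∀ p ∈ ps, C p) →
    ∀ p ∈ (d.update ps).items, C p := by
  intro ps
  induction ps with
  | nil => intro d hd _ p hp; exact hd p hp
  | cons q ps ih =>
    intro d hd hps p hp
    have : (d.update (q :: ps)) = ((d.insert q.1 q.2).update ps) := rfl
    rw [this] at hp
    refine ih _ ?_ (fun r hr => hps r (List.mem_cons_of_mem _ hr)) p hp
    intro r hr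
    rcases (PySem.Dict.mem_items_insert d q.1 q.2 r).1 hr with h | ⟨h, _⟩
    · subst h; exact hps q (List.mem_cons_self ..)
    · exact hd r h

lemma pvSuccs_subset_flat (rules : List (String × List String)) (x y : String)
    (hy : y ∈ pvSuccs rules x) : y ∈ pvFlat rules := by
  unfold pvSuccs at hy
  rw [PySem.Dict.getD_eq_get?_getD] at hy
  cases hv : (PySem.Dict.ofList rules).get? x with
  | none => rw [hv] at hy; simp at hy
  | some v =>
    rw [hv] at hy
    simp only [Option.getD_some] at hy
    have hmem := PySem.Dict.mem_items_of_get?_eq_some _ hv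
    have := pvItems_update (fun p => ∀ z ∈ p.2, z ∈ pvFlat rules) rules PySem.Dict.empty
      (by intro p hp; simp [PySem.Dict.empty] at hp)
      (by intro p hp z hz; exact List.mem_flatMap.2 ⟨p, hp, hz⟩)
      _ hmem
    exact this y hy

lemma pvMem_toAdd (rules : List (String × List String)) (had : List String) (y : String) :
    (y ∈ had.foldl (fun acc c => PySem.Set.update acc (pvSuccs rules c)) PySem.Set.empty)
      ↔ ∃ c ∈ had, y ∈ pvSuccs rules c := by
  have aux : ∀ (l : List String) (acc : PySem.Set String),
      (y ∈ l.foldl (fun acc c => PySem.Set.update acc (pvSuccs rules c)) acc)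
        ↔ y ∈ acc ∨ ∃ c ∈ l, y ∈ pvSuccs rules c := by
    intro l
    induction l with
    | nil => simp
    | cons c l ih =>
      intro acc
      simp only [List.foldl_cons, ih, PySem.Set.mem_update, List.mem_cons]
      constructor
      · rintro ((h | h) | ⟨d, hd, hy⟩)
        · exact Or.inl h
        · exact Or.inr ⟨c, Or.inl rfl, h⟩
        · exact Or.inr ⟨d, Or.inr hd, hy⟩
      · rintro (h | ⟨d, (rfl | hd), hy⟩)
        · exact Or.inl (Or.inl h)
        · exact Or.inl (Or.inr hy)
        · exact Or.inr ⟨d, hd, hy⟩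
  rw [aux]
  simp [PySem.Set.empty]

lemma pvConvLoop_iff (wanted : String) (rules : List (String × List String))
    (U : List String) (hU : ∀ x y, y ∈ pvSuccs rules x → y ∈ U) :
    ∀ (fuel initN : Nat) (had : PySem.Set String),
    had.Nodup → (∀ x ∈ had, x ∈ U) → initN ≤ had.length →
    (PySem.Set.ofList U).length < fuel + initN →
    (had.length ≤ initN → ∀ x ∈ had, ∀ y ∈ pvSuccs rules x, y ∈ had) →
    (pvConvLoop wanted rules fuel initN had = true ↔ ∃ a ∈ had, pvReach rules a wanted) := by
  intro fuel
  induction fuel with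
  | zero =>
    intro initN had hnd hsub hin hfuel _
    exfalso
    have hUb : had.length ≤ (PySem.Set.ofList U).length := by
      refine List.Subperm.length_le (List.Nodup.subperm hnd ?_)
      intro x hx
      exact (PySem.Set.mem_ofList U x).2 (hsub x hx)
    omega
  | succ fuel ih =>
    intro initN had hnd hsub hin hfuel hclosed
    cases hcont : PySem.Set.contains had wanted with
    | true =>
      have hw : wanted ∈ had := (PySem.Set.contains_iff _ _).1 hcont
      have hres : pvConvLoop wanted rules (fuel+1) initN had = true := by
        simp [pvConvLoop, hw]
      rw [hres]
      simp only [true_iff]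
      exact ⟨wanted, hw, Relation.ReflTransGen.refl⟩
    | false =>
      have hw : wanted ∉ had := fun h => by
        rw [(PySem.Set.contains_iff _ _).2 h] at hcont; cases hcont
      by_cases hgrow : initN < had.length
      · -- loop body runs once more
        have hstep : pvConvLoop wanted rules (fuel+1) initN had
            = pvConvLoop wanted rules fuel had.length
              (PySem.Set.update had
                (had.foldl (fun acc c => PySem.Set.update acc (pvSuccs rules c)) PySem.Set.empty)) := by
          simp [pvConvLoop, hgrow, hw]
        set toAdd := had.foldl (fun acc c => PySem.Set.update acc (pvSuccs rules c)) PySem.Set.empty with htoAdd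
        set had' := PySem.Set.update had toAdd with hhad'
        have hmem' : ∀ y, y ∈ had' ↔ y ∈ had ∨ ∃ c ∈ had, y ∈ pvSuccs rules c := by
          intro y
          rw [hhad', PySem.Set.mem_update, htoAdd, pvMem_toAdd]
        have hsub' : ∀ x ∈ had', x ∈ U := by
          intro x hx
          rcases (hmem' x).1 hx with h | ⟨c, _, h⟩
          · exact hsub x h
          · exact hU c x h
        have hext : had' = had ++ List.filter (fun y => !had.contains y) (PySem.Set.ofList toAdd) :=
          PySem.Set.update_eq_append_filter had toAdd
        have hlenext : had'.length = had.length
            + (List.filter (fun y => !had.contains y) (PySem.Set.ofList toAdd)).length := by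
          rw [hext, List.length_append]
        have hrec := ih had.length had' (PySem.Set.nodup_update _ _ hnd) hsub'
          (by omega) (by omega) ?hcl
        case hcl =>
          intro hle x hx y hy
          have hfl : List.filter (fun y => !had.contains y) (PySem.Set.ofList toAdd) = [] :=
            List.eq_nil_of_length_eq_zero (by omega)
          have hhad'eq : had' = had := by rw [hext, hfl, List.append_nil]
          rw [hhad'eq] at hx ⊢
          have hyA : y ∈ toAdd := (pvMem_toAdd rules had y).2 ⟨x, hx, hy⟩
          by_contra hyn
          have hyf : y ∈ List.filter (fun y => !had.contains y) (PySem.Set.ofList toAdd) := by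
            refine List.mem_filter.2 ⟨(PySem.Set.mem_ofList _ _).2 hyA, ?_⟩
            cases h : had.contains y with
            | true => exact absurd ((PySem.Set.contains_iff _ _).1 h) hyn
            | false => rfl
          rw [hfl] at hyf
          exact absurd hyf (List.not_mem_nil)
        rw [hstep, hrec]
        constructor
        · rintro ⟨a, ha, hr⟩
          rcases (hmem' a).1 ha with h | ⟨c, hc, h⟩
          · exact ⟨a, h, hr⟩
          · exact ⟨c, hc, Relation.ReflTransGen.head h hr⟩
        · rintro ⟨a, ha, hr⟩
          exact ⟨a, (hmem' a).2 (Or.inl ha), hr⟩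
      · -- exit: set stopped growing, had is closed
        have hres : (pvConvLoop wanted rules (fuel+1) initN had = true) ↔ wanted ∈ had := by
          simp [pvConvLoop, hgrow]
        rw [hres]
        constructor
        · intro h; exact False.elim (hw h)
        · rintro ⟨a, ha, hr⟩
          exact absurd (pvReach_closed rules had (hclosed (by omega)) ha hr) hw

-- facts about the push-successors fold of B
lemma pvPush_mem_visited (l : List String) :
    ∀ (st : List String) (vis : PySem.Set String) (y : String),
    y ∈ (l.foldl (fun (sv : List String × PySem.Set String) nxt =>
          if PySem.Set.contains sv.2 nxt then sv
          else (sv.1 ++ [nxt], PySem.Set.add sv.2 nxt)) (st, vis)).2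
      ↔ y ∈ vis ∨ y ∈ l := by
  induction l with
  | nil => simp
  | cons n l ih =>
    intro st vis y
    simp only [List.foldl_cons]
    by_cases h : PySem.Set.contains vis n = true
    · rw [if_pos h]
      rw [ih]
      have hn : n ∈ vis := (PySem.Set.contains_iff _ _).1 h
      constructor
      · rintro (hy | hy)
        · exact Or.inl hy
        · exact Or.inr (List.mem_cons_of_mem _ hy)
      · rintro (hy | hy)
        · exact Or.inl hy
        · rcases List.mem_cons.1 hy with rfl | hy
          · exact Or.inl hn
          · exact Or.inr hy
    · rw [if_neg h]
      rw [ih]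
      simp only [PySem.Set.mem_add, List.mem_cons]
      tauto

lemma pvPush_stack_sub (l : List String) :
    ∀ (st : List String) (vis : PySem.Set String) (x : String),
    x ∈ st →
    x ∈ (l.foldl (fun (sv : List String × PySem.Set String) nxt =>
          if PySem.Set.contains sv.2 nxt then sv
          else (sv.1 ++ [nxt], PySem.Set.add sv.2 nxt)) (st, vis)).1 := by
  induction l with
  | nil => intro st vis x hx; simpa using hx
  | cons n l ih =>
    intro st vis x hx
    simp only [List.foldl_cons]
    by_cases h : PySem.Set.contains vis n = true
    · rw [if_pos h]; exact ih _ _ _ hx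
    · rw [if_neg h]; exact ih _ _ _ (List.mem_append_left _ hx)

lemma pvPush_stack_mem (l : List String) :
    ∀ (st : List String) (vis : PySem.Set String) (x : String),
    x ∈ (l.foldl (fun (sv : List String × PySem.Set String) nxt =>
          if PySem.Set.contains sv.2 nxt then sv
          else (sv.1 ++ [nxt], PySem.Set.add sv.2 nxt)) (st, vis)).1 →
    x ∈ st ∨ x ∈ l := by
  induction l with
  | nil => intro st vis x hx; exact Or.inl (by simpa using hx)
  | cons n l ih =>
    intro st vis x hx
    simp only [List.foldl_cons] at hx
    by_cases h : PySem.Set.contains vis n = true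
    · rw [if_pos h] at hx
      rcases ih _ _ _ hx with h' | h'
      · exact Or.inl h'
      · exact Or.inr (List.mem_cons_of_mem _ h')
    · rw [if_neg h] at hx
      rcases ih _ _ _ hx with h' | h'
      · rcases List.mem_append.1 h' with h'' | h''
        · exact Or.inl h''
        · rw [List.mem_singleton.1 h'']; exact Or.inr (List.mem_cons_self ..)
      · exact Or.inr (List.mem_cons_of_mem _ h')

lemma pvPush_visited_cover (l : List String) :
    ∀ (st : List String) (vis : PySem.Set String) (x : String),
    x ∈ (l.foldl (fun (sv : List String × PySem.Set String) nxt =>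
          if PySem.Set.contains sv.2 nxt then sv
          else (sv.1 ++ [nxt], PySem.Set.add sv.2 nxt)) (st, vis)).2 →
    x ∈ vis ∨ x ∈ (l.foldl (fun (sv : List String × PySem.Set String) nxt =>
          if PySem.Set.contains sv.2 nxt then sv
          else (sv.1 ++ [nxt], PySem.Set.add sv.2 nxt)) (st, vis)).1 := by
  induction l with
  | nil => intro st vis x hx; exact Or.inl (by simpa using hx)
  | cons n l ih =>
    intro st vis x hx
    simp only [List.foldl_cons] at hx ⊢
    by_cases h : PySem.Set.contains vis n = true
    · rw [if_pos h] at hx ⊢; exact ih _ _ _ hx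
    · rw [if_neg h] at hx ⊢
      rcases ih _ _ _ hx with h' | h'
      · rcases (PySem.Set.mem_add _ _ _).1 h' with h'' | rfl
        · exact Or.inl h''
        · exact Or.inr (pvPush_stack_sub l _ _ _ (List.mem_append_right _ (List.mem_singleton.2 rfl)))
      · exact Or.inr h'

lemma pvPush_nodup (l : List String) :
    ∀ (st : List String) (vis : PySem.Set String), vis.Nodup →
    (l.foldl (fun (sv : List String × PySem.Set String) nxt =>
          if PySem.Set.contains sv.2 nxt then sv
          else (sv.1 ++ [nxt], PySem.Set.add sv.2 nxt)) (st, vis)).2.Nodup := by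
  induction l with
  | nil => intro st vis h; simpa using h
  | cons n l ih =>
    intro st vis h
    simp only [List.foldl_cons]
    by_cases hc : PySem.Set.contains vis n = true
    · rw [if_pos hc]; exact ih _ _ h
    · rw [if_neg hc]; exact ih _ _ (PySem.Set.nodup_add _ _ h)

lemma pvPush_length (l : List String) :
    ∀ (st : List String) (vis : PySem.Set String),
    (l.foldl (fun (sv : List String × PySem.Set String) nxt =>
          if PySem.Set.contains sv.2 nxt then sv
          else (sv.1 ++ [nxt], PySem.Set.add sv.2 nxt)) (st, vis)).1.length + vis.length
      = st.length + (l.foldl (fun (sv : List String × PySem.Set String) nxt =>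
          if PySem.Set.contains sv.2 nxt then sv
          else (sv.1 ++ [nxt], PySem.Set.add sv.2 nxt)) (st, vis)).2.length := by
  induction l with
  | nil => intro st vis; simp
  | cons n l ih =>
    intro st vis
    simp only [List.foldl_cons]
    by_cases hc : PySem.Set.contains vis n = true
    · rw [if_pos hc]; exact ih _ _
    · have hmem : n ∉ vis := fun h => by
        rw [(PySem.Set.contains_iff _ _).2 h] at hc; exact hc rfl
      have hadd : PySem.Set.add vis n = vis ++ [n] := PySem.Set.add_of_not_mem hmem
      rw [if_neg hc, hadd]
      have h2 := ih (st ++ [n]) (vis ++ [n])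
      simp only [List.length_append, List.length_cons, List.length_nil] at h2 ⊢
      omega

lemma pvDfs_iff (target : String) (rules : List (String × List String))
    (U : List String) (hU : ∀ x y, y ∈ pvSuccs rules x → y ∈ U) :
    ∀ (fuel : Nat) (stack : List String) (visited : PySem.Set String),
    visited.Nodup → (∀ x ∈ stack, x ∈ visited) → (∀ x ∈ visited, x ∈ U) →
    (∀ x ∈ visited, x ∈ stack ∨ (x ≠ target ∧ ∀ y ∈ pvSuccs rules x, y ∈ visited)) →
    (PySem.Set.ofList U).length + 1 + stack.length ≤ fuel + visited.length →
    (pvDfs target rules fuel stack visited = true ↔ ∃ a ∈ visited, pvReach rules a target) := by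
  intro fuel
  induction fuel with
  | zero =>
    intro stack visited hnd _ hsubU _ hfuel
    exfalso
    have hUb : visited.length ≤ (PySem.Set.ofList U).length := by
      refine List.Subperm.length_le (List.Nodup.subperm hnd ?_)
      intro x hx
      exact (PySem.Set.mem_ofList U x).2 (hsubU x hx)
    omega
  | succ fuel ih =>
    intro stack visited hnd hstv hsubU hinv hfuel
    rcases List.eq_nil_or_concat stack with rfl | ⟨rest, node, rfl⟩
    · -- empty stack: return False; visited is closed and misses target
      have hres : pvDfs target rules (fuel+1) [] visited = false := by
        simp [pvDfs, PySem.List.pop?]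
      rw [hres]
      simp only [Bool.false_eq_true, false_iff]
      rintro ⟨a, ha, hr⟩
      have hcl : ∀ x ∈ visited, ∀ y ∈ pvSuccs rules x, y ∈ visited := by
        intro x hx
        rcases hinv x hx with h | ⟨_, h⟩
        · exact absurd h (List.not_mem_nil)
        · exact h
      have htv : target ∈ visited := pvReach_closed rules visited hcl ha hr
      rcases hinv target htv with h | ⟨h, _⟩
      · exact List.not_mem_nil h
      · exact h rfl
    · -- pop the last element
      simp only [List.concat_eq_append] at hstv hinv hfuel ⊢
      have hpop : PySem.List.pop? (rest ++ [node]) (-1) = some (node, rest) :=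
        PySem.List.pop?_last rest node
      by_cases htgt : node = target
      · -- early exit: target found
        have hres : pvDfs target rules (fuel+1) (rest ++ [node]) visited = true := by
          simp only [pvDfs, hpop]
          simp [htgt]
        rw [hres]
        simp only [true_iff]
        exact ⟨node, hstv node (List.mem_append_right _ (List.mem_singleton.2 rfl)), htgt ▸ Relation.ReflTransGen.refl⟩
      · have hbeq : (node == target) = false := by
          simp [htgt]
        have hnodev : node ∈ visited := hstv node (List.mem_append_right _ (List.mem_singleton.2 rfl))
        have hres : pvDfs target rules (fuel+1) (rest ++ [node]) visited
            = pvDfs target rules fuel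
              ((pvSuccs rules node).foldl
                (fun (sv : List String × PySem.Set String) nxt =>
                  if PySem.Set.contains sv.2 nxt then sv
                  else (sv.1 ++ [nxt], PySem.Set.add sv.2 nxt)) (rest, visited)).1
              ((pvSuccs rules node).foldl
                (fun (sv : List String × PySem.Set String) nxt =>
                  if PySem.Set.contains sv.2 nxt then sv
                  else (sv.1 ++ [nxt], PySem.Set.add sv.2 nxt)) (rest, visited)).2 := by
          simp [pvDfs, hpop, hbeq]
        set l := pvSuccs rules node with hl
        set r := l.foldl (fun (sv : List String × PySem.Set String) nxt =>
                  if PySem.Set.contains sv.2 nxt then sv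
                  else (sv.1 ++ [nxt], PySem.Set.add sv.2 nxt)) (rest, visited) with hr
        have hmem2 : ∀ y, y ∈ r.2 ↔ y ∈ visited ∨ y ∈ l := fun y => pvPush_mem_visited l rest visited y
        have hrec := ih r.1 r.2 (pvPush_nodup l rest visited hnd) ?hst ?hsU ?hinv' ?hf
        case hst =>
          intro x hx
          rcases pvPush_stack_mem l rest visited x hx with h | h
          · exact (hmem2 x).2 (Or.inl (hstv x (List.mem_append_left _ h)))
          · exact (hmem2 x).2 (Or.inr h)
        case hsU =>
          intro x hx
          rcases (hmem2 x).1 hx with h | h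
          · exact hsubU x h
          · exact hU node x h
        case hinv' =>
          intro x hx
          rcases (hmem2 x).1 hx with hxv | hxl
          · rcases hinv x hxv with hxs | ⟨hxt, hxcl⟩
            · rcases List.mem_append.1 hxs with hxr | hxn
              · exact Or.inl (pvPush_stack_sub l rest visited x hxr)
              · -- x = node: now expanded, closed
                rw [List.mem_singleton.1 hxn]
                exact Or.inr ⟨htgt, fun y hy => (hmem2 y).2 (Or.inr hy)⟩
            · exact Or.inr ⟨hxt, fun y hy => (hmem2 y).2 (Or.inl (hxcl y hy))⟩
          · -- x was pushed or already present
            rcases pvPush_visited_cover l rest visited x ((hmem2 x).2 (Or.inr hxl)) with hxv | hxs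
            · rcases hinv x hxv with hxs | ⟨hxt, hxcl⟩
              · rcases List.mem_append.1 hxs with hxr | hxn
                · exact Or.inl (pvPush_stack_sub l rest visited x hxr)
                · rw [List.mem_singleton.1 hxn]
                  exact Or.inr ⟨htgt, fun y hy => (hmem2 y).2 (Or.inr hy)⟩
              · exact Or.inr ⟨hxt, fun y hy => (hmem2 y).2 (Or.inl (hxcl y hy))⟩
            · exact Or.inl hxs
        case hf =>
          have hlen : r.1.length + visited.length = rest.length + r.2.length :=
            pvPush_length l rest visited
          have : (rest ++ [node]).length = rest.length + 1 := by simp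
          omega
        rw [hres, hrec]
        constructor
        · rintro ⟨a, ha, hra⟩
          rcases (hmem2 a).1 ha with h | h
          · exact ⟨a, h, hra⟩
          · exact ⟨node, hnodev, Relation.ReflTransGen.head h hra⟩
        · rintro ⟨a, ha, hra⟩
          exact ⟨a, (hmem2 a).2 (Or.inl ha), hra⟩

lemma pvChar_eq (w c : String) (rules : List (String × List String)) :
    pvConversionPossible w rules (PySem.Set.ofList [c]) = pvReachable c w rules := by
  have hofl : PySem.Set.ofList [c] = [c] :=
    PySem.Set.ofList_eq_self_of_nodup [c] (List.nodup_singleton c)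
  have hU : ∀ x y, y ∈ pvSuccs rules x → y ∈ (c :: pvFlat rules) :=
    fun x y hy => List.mem_cons_of_mem _ (pvSuccs_subset_flat rules x y hy)
  have hUb : (PySem.Set.ofList (c :: pvFlat rules)).length ≤ 1 + (pvFlat rules).length := by
    have := PySem.Set.length_ofList_le (c :: pvFlat rules)
    simpa [Nat.add_comm] using this
  have hA : pvConversionPossible w rules (PySem.Set.ofList [c]) = true ↔ pvReach rules c w := by
    unfold pvConversionPossible
    rw [hofl]
    rw [pvConvLoop_iff w rules (c :: pvFlat rules) hU _ 0 [c]
      (List.nodup_singleton c)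
      (fun x hx => by rw [List.mem_singleton.1 hx]; exact List.mem_cons_self ..)
      (by simp)
      (by simp only [List.length_cons, List.length_nil]; omega)
      (by simp only [List.length_cons, List.length_nil]; omega)]
    constructor
    · rintro ⟨a, ha, hr⟩; rwa [← List.mem_singleton.1 ha]
    · intro h; exact ⟨c, List.mem_singleton.2 rfl, h⟩
  have hB : pvReachable c w rules = true ↔ pvReach rules c w := by
    unfold pvReachable
    rw [hofl] at *
    rw [pvDfs_iff w rules (c :: pvFlat rules) hU _ [c] [c]
      (List.nodup_singleton c)
      (fun x hx => hx)
      (fun x hx => by rw [List.mem_singleton.1 hx]; exact List.mem_cons_self ..)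
      (fun x hx => Or.inl hx)
      (by simp only [List.length_cons, List.length_nil]; omega)]
    constructor
    · rintro ⟨a, ha, hr⟩; rwa [← List.mem_singleton.1 ha]
    · intro h; exact ⟨c, List.mem_singleton.2 rfl, h⟩
  rw [Bool.eq_iff_iff, hA, hB]

set_option maxHeartbeats 1000000 in
lemma pvTop (wanted : String) (initial : String) (rules : List (String × List String)) :
    is_creatable wanted initial rules = is_creatable_alt wanted initial rules := by
  unfold is_creatable is_creatable_alt
  by_cases h : PySem.Str.len wanted = PySem.Str.len initial
  case neg =>
    have hb : (PySem.Str.len wanted != PySem.Str.len initial) = true := by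
      simpa using h
    rw [hb, if_pos rfl, if_pos rfl]
  case pos =>
    have hb : (PySem.Str.len wanted != PySem.Str.len initial) = false := by
      simpa using h
    rw [hb, if_neg (by simp), if_neg (by simp)]
    have hlen : wanted.toList.length = initial.toList.length := by
      simp only [PySem.Str.len_eq] at h
      exact_mod_cast h
    set n := initial.toList.length with hn
    have hrange : PySem.List.pyRange 0 (PySem.Str.len initial) 1
        = List.map (fun k : Nat => (k : Int)) (List.range n) := by
      rw [PySem.Str.len_eq]
      exact PySem.List.pyRange_zero_nat n
    rw [hrange, List.all_map]
    rw [Bool.eq_iff_iff, List.all_eq_true, List.all_eq_true]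
    constructor
    · intro hAll wc hwc
      rcases List.mem_iff_getElem.1 hwc with ⟨k, hk, hget⟩
      have hkn : k < n := by
        simp only [List.length_zip, hlen] at hk
        omega
      have hP := hAll k (List.mem_range.2 hkn)
      rw [← hget, List.getElem_zip]
      simp only [Function.comp] at hP
      have hw : pvIdxStr wanted (k : Int) = String.ofList [wanted.toList[k]'(by omega)] := by
        unfold pvIdxStr
        rw [PySem.Str.pyGet?_natCast, List.getElem?_eq_getElem (by omega)]
      have hc : pvIdxStr initial (k : Int) = String.ofList [initial.toList[k]'(by omega)] := by
        unfold pvIdxStr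
        rw [PySem.Str.pyGet?_natCast, List.getElem?_eq_getElem (by omega)]
      rw [hw, hc, pvChar_eq] at hP
      exact hP
    · intro hAll k hk
      have hkn : k < n := List.mem_range.1 hk
      simp only [Function.comp]
      have hw : pvIdxStr wanted (k : Int) = String.ofList [wanted.toList[k]'(by omega)] := by
        unfold pvIdxStr
        rw [PySem.Str.pyGet?_natCast, List.getElem?_eq_getElem (by omega)]
      have hc : pvIdxStr initial (k : Int) = String.ofList [initial.toList[k]'(by omega)] := by
        unfold pvIdxStr
        rw [PySem.Str.pyGet?_natCast, List.getElem?_eq_getElem (by omega)]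
      rw [hw, hc, pvChar_eq]
      have hmem : (wanted.toList[k]'(by omega), initial.toList[k]'hkn)
          ∈ wanted.toList.zip initial.toList := by
        refine List.mem_iff_getElem.2 ⟨k, ?_, ?_⟩
        · simp only [List.length_zip, hlen]
          omega
        · rw [List.getElem_zip]
      exact hAll _ hmem

-- ===== VERDICT (by name: the statement is the Claim_ definition above) =====
theorem is_creatable_spec : Claim_equal_is_creatable := by
  intro wanted initial rules _
  unfold Spec_is_creatable
  exact pvTop wanted initial rules
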